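-- pv_equiv track=rewrite | github.com/UsernamePSQ/nlp_final | stat-nlp-book/assignments/2019/final_assignment/problem/Extra_files/modules/UMLS.py | _extract_entity_pairs
-- ===== SOURCE A (Python) =====
-- def _extract_entity_pairs(data_X):
--     entity_pairs = []
--     for data_point in data_X:
--
--         ### Extract sentence between entities ###
--         length_first_entity = [x[1] for x in data_point].index('1')
--         begin_last_entity = [x[2] for x in data_point].index('-1')
--
--         ### Extract entities:
--         entity_1 = data_point[0:length_first_entity]
--         entity_2 = data_point[(begin_last_entity+1):]
--
--         ##
--         entity_1_text = ' '.join([x[0] for x in entity_1]).lower()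
--         entity_2_text = ' '.join([x[0] for x in entity_2]).lower()
--
--         entity_pairs.append((entity_1_text,entity_2_text))
--
--     return entity_pairs
-- ===== SOURCE B (Python) =====
-- def _entity_pair(data_point):
--     # one forward pass: words before the first col1=='1' marker, words after the
--     # first col2=='-1' marker
--     e1_words = []
--     e2_words = []
--     seen1 = False
--     seen2 = False
--     for word, c1, c2 in data_point:
--         if not seen1:
--             if c1 == '1':
--                 seen1 = True
--             else:
--                 e1_words.append(word)
--         if seen2:
--             e2_words.append(word)
--         elif c2 == '-1':
--             seen2 = True
--     return (' '.join(e1_words).lower(), ' '.join(e2_words).lower())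
--
--
-- def _extract_entity_pairs(data_X):
--     return [_entity_pair(data_point) for data_point in data_X]
-- ===== Notes on version B (the rewrite author's own statement) =====
-- stated objective: alternative
-- what changed: Replaces the column-projection + list.index + two slices per data point with a single forward pass that accumulates the first-entity words until the first col1=='1' token and the second-entity words after the first col2=='-1' token.
import Mathlib
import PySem

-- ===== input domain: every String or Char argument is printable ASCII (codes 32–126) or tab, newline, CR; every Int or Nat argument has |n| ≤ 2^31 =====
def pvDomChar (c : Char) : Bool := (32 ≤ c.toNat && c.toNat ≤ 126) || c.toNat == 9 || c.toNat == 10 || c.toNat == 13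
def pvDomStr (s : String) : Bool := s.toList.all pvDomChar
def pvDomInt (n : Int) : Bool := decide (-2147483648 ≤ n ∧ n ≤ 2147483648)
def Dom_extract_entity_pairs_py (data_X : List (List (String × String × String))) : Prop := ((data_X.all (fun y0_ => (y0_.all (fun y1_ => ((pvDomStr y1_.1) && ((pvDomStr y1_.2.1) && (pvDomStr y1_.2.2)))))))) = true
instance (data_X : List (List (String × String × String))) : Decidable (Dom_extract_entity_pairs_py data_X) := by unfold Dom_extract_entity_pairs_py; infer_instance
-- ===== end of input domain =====

-- B replaces the column-build + .index + slice pattern with one forward accumulating pass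
-- per data point (objective: alternative, same asymptotic cost).

-- ===== PORT A =====
-- literal transliteration of A: per point, index of '1' in column 1 and of '-1' in column 2,
-- then two slices, join and lower.  Where list.index raises ValueError (index? = none) the
-- point is skipped; those inputs are excluded by Pre_.
def extract_entity_pairs_py (data_X : List (List (String × String × String))) : List (String × String) :=
  data_X.foldl (fun entity_pairs data_point =>
    match PySem.List.index? (data_point.map (fun x => x.2.1)) "1",
          PySem.List.index? (data_point.map (fun x => x.2.2)) "-1" with
    | some length_first_entity, some begin_last_entity =>
        let entity_1 := PySem.List.slice data_point (some 0) (some (length_first_entity : Int))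
        let entity_2 := PySem.List.slice data_point (some ((begin_last_entity : Int) + 1)) none
        let entity_1_text := PySem.Str.lower (PySem.Str.join " " (entity_1.map (fun x => x.1)))
        let entity_2_text := PySem.Str.lower (PySem.Str.join " " (entity_2.map (fun x => x.1)))
        entity_pairs ++ [(entity_1_text, entity_2_text)]
    | _, _ => entity_pairs) []

-- ===== PORT B =====
-- per-point single forward pass: state ((seen1, e1_words), (seen2, e2_words))
def pvAltPoint (data_point : List (String × String × String)) : String × String :=
  let st := data_point.foldl
    (fun (s : (Bool × List String) × (Bool × List String)) x =>
      ((if s.1.1 then s.1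
        else if x.2.1 == "1" then (true, s.1.2) else (false, s.1.2 ++ [x.1])),
       (if s.2.1 then (true, s.2.2 ++ [x.1])
        else if x.2.2 == "-1" then (true, s.2.2) else s.2)))
    ((false, []), (false, []))
  (PySem.Str.lower (PySem.Str.join " " st.1.2), PySem.Str.lower (PySem.Str.join " " st.2.2))

def extract_entity_pairs_py_alt (data_X : List (List (String × String × String))) : List (String × String) :=
  data_X.map pvAltPoint

-- ===== PRECONDITION & SPEC =====
-- Pre_ excludes the inputs on which A raises ValueError: a data point whose second column
-- has no '1' or whose third column has no '-1' (list.index fails there).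
def Pre_extract_entity_pairs_py (data_X : List (List (String × String × String))) : Prop :=
  ∀ dp ∈ data_X, "1" ∈ dp.map (fun x => x.2.1) ∧ "-1" ∈ dp.map (fun x => x.2.2)
instance (data_X : List (List (String × String × String))) : Decidable (Pre_extract_entity_pairs_py data_X) := by unfold Pre_extract_entity_pairs_py; infer_instance

def pvWitness_extract_entity_pairs_py : (List (List (String × String × String))) :=
  [[("He", "0", "0"), ("dog", "1", "0"), ("ate", "0", "-1"), ("Food", "0", "0")]]

def Spec_extract_entity_pairs_py (data_X : List (List (String × String × String))) (out : List (String × String)) : Prop := out = extract_entity_pairs_py_alt data_X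
instance (data_X : List (List (String × String × String))) (out : List (String × String)) : Decidable (Spec_extract_entity_pairs_py data_X out) := by unfold Spec_extract_entity_pairs_py; infer_instance

-- ===== CLAIM (what is proved, stated in full; the proofs are below) =====
def Claim_equal_extract_entity_pairs_py : Prop := ∀ (data_X : List (List (String × String × String))), Dom_extract_entity_pairs_py data_X → Pre_extract_entity_pairs_py data_X → Spec_extract_entity_pairs_py data_X (extract_entity_pairs_py data_X)

-- ===== LEMMAS AND PROOFS =====

-- the two per-point step functions of B's loop (proof abbreviations; definitionally the
-- two components of the inline step in pvAltPoint)
def pvF (s : Bool × List String) (x : String × String × String) : Bool × List String :=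
  if s.1 then s else if x.2.1 == "1" then (true, s.2) else (false, s.2 ++ [x.1])
def pvG (s : Bool × List String) (x : String × String × String) : Bool × List String :=
  if s.1 then (true, s.2 ++ [x.1]) else if x.2.2 == "-1" then (true, s.2) else s

lemma pvF_true (l : List (String × String × String)) (acc : List String) :
    l.foldl pvF (true, acc) = (true, acc) := by
  induction l with
  | nil => rfl
  | cons x t ih => simpa [pvF] using ih

lemma pvG_true (l : List (String × String × String)) (acc : List String) :
    l.foldl pvG (true, acc) = (true, acc ++ l.map (fun x => x.1)) := by
  induction l generalizing acc with
  | nil => simp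
  | cons x t ih => simp [pvG, ih]

lemma pvF_spec (l : List (String × String × String)) (k : Nat) (acc : List String)
    (h : PySem.List.index? (l.map (fun x => x.2.1)) "1" = some k) :
    l.foldl pvF (false, acc) = (true, acc ++ (l.take k).map (fun x => x.1)) := by
  induction l generalizing k acc with
  | nil => simp [PySem.List.index?] at h
  | cons x t ih =>
    by_cases hx : x.2.1 = "1"
    · rw [List.map_cons, hx, PySem.List.index?_cons_self] at h
      obtain rfl : k = 0 := (Option.some.inj h).symm
      simp [pvF, hx, pvF_true]
    · rw [List.map_cons, PySem.List.index?_cons_of_ne _ hx] at h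
      obtain ⟨k', hk', rfl⟩ := Option.map_eq_some_iff.mp h
      simp [pvF, hx, ih k' (acc ++ [x.1]) hk']

lemma pvG_spec (l : List (String × String × String)) (k : Nat) (acc : List String)
    (h : PySem.List.index? (l.map (fun x => x.2.2)) "-1" = some k) :
    l.foldl pvG (false, acc) = (true, acc ++ (l.drop (k + 1)).map (fun x => x.1)) := by
  induction l generalizing k acc with
  | nil => simp [PySem.List.index?] at h
  | cons x t ih =>
    by_cases hx : x.2.2 = "-1"
    · rw [List.map_cons, hx, PySem.List.index?_cons_self] at h
      obtain rfl : k = 0 := (Option.some.inj h).symm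
      simp [pvG, hx, pvG_true]
    · rw [List.map_cons, PySem.List.index?_cons_of_ne _ hx] at h
      obtain ⟨k', hk', rfl⟩ := Option.map_eq_some_iff.mp h
      simp [pvG, hx, ih k' acc hk']

lemma pvPoint_eq (dp : List (String × String × String)) (i j : Nat)
    (hi : PySem.List.index? (dp.map (fun x => x.2.1)) "1" = some i)
    (hj : PySem.List.index? (dp.map (fun x => x.2.2)) "-1" = some j) :
    (PySem.Str.lower (PySem.Str.join " "
       ((PySem.List.slice dp (some 0) (some (i : Int))).map (fun x => x.1))),
     PySem.Str.lower (PySem.Str.join " "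
       ((PySem.List.slice dp (some ((j : Int) + 1)) none).map (fun x => x.1)))) =
    pvAltPoint dp := by
  have e1 : PySem.List.slice dp (some 0) (some (i : Int)) = dp.take i := by
    simp [PySem.List.slice_to_natCast]
  have e2 : PySem.List.slice dp (some ((j : Int) + 1)) none = dp.drop (j + 1) := by
    rw [show ((j : Int) + 1) = ((j + 1 : Nat) : Int) from by push_cast; ring,
        PySem.List.slice_from_natCast]
  have hfold : dp.foldl
      (fun (s : (Bool × List String) × (Bool × List String)) x =>
        ((if s.1.1 then s.1
          else if x.2.1 == "1" then (true, s.1.2) else (false, s.1.2 ++ [x.1])),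
         (if s.2.1 then (true, s.2.2 ++ [x.1])
          else if x.2.2 == "-1" then (true, s.2.2) else s.2)))
      ((false, []), (false, [])) = (dp.foldl pvF (false, []), dp.foldl pvG (false, [])) :=
    PySem.List.foldl_prod_mk pvF pvG dp (false, []) (false, [])
  unfold pvAltPoint
  rw [hfold, pvF_spec dp i [] hi, pvG_spec dp j [] hj, e1, e2]
  simp

lemma pvMain (data_X : List (List (String × String × String)))
    (hpre : Pre_extract_entity_pairs_py data_X) (acc : List (String × String)) :
    data_X.foldl (fun entity_pairs data_point =>
      match PySem.List.index? (data_point.map (fun x => x.2.1)) "1",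
            PySem.List.index? (data_point.map (fun x => x.2.2)) "-1" with
      | some length_first_entity, some begin_last_entity =>
          let entity_1 := PySem.List.slice data_point (some 0) (some (length_first_entity : Int))
          let entity_2 := PySem.List.slice data_point (some ((begin_last_entity : Int) + 1)) none
          let entity_1_text := PySem.Str.lower (PySem.Str.join " " (entity_1.map (fun x => x.1)))
          let entity_2_text := PySem.Str.lower (PySem.Str.join " " (entity_2.map (fun x => x.1)))
          entity_pairs ++ [(entity_1_text, entity_2_text)]
      | _, _ => entity_pairs) acc = acc ++ data_X.map pvAltPoint := by
  induction data_X generalizing acc with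
  | nil => simp
  | cons dp t ih =>
    obtain ⟨h1, h2⟩ := hpre dp (List.mem_cons_self)
    have hpre' : Pre_extract_entity_pairs_py t := fun d hd => hpre d (List.mem_cons_of_mem _ hd)
    obtain ⟨i, hi⟩ := Option.isSome_iff_exists.mp ((PySem.List.index?_isSome_iff _ _).mpr h1)
    obtain ⟨j, hj⟩ := Option.isSome_iff_exists.mp ((PySem.List.index?_isSome_iff _ _).mpr h2)
    have hstep : ∀ l : List (List (String × String × String)), (dp :: l).foldl
        (fun entity_pairs data_point =>
          match PySem.List.index? (data_point.map (fun x => x.2.1)) "1",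
                PySem.List.index? (data_point.map (fun x => x.2.2)) "-1" with
          | some length_first_entity, some begin_last_entity =>
              let entity_1 := PySem.List.slice data_point (some 0) (some (length_first_entity : Int))
              let entity_2 := PySem.List.slice data_point (some ((begin_last_entity : Int) + 1)) none
              let entity_1_text := PySem.Str.lower (PySem.Str.join " " (entity_1.map (fun x => x.1)))
              let entity_2_text := PySem.Str.lower (PySem.Str.join " " (entity_2.map (fun x => x.1)))
              entity_pairs ++ [(entity_1_text, entity_2_text)]
          | _, _ => entity_pairs) acc = l.foldl
        (fun entity_pairs data_point =>
          match PySem.List.index? (data_point.map (fun x => x.2.1)) "1",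
                PySem.List.index? (data_point.map (fun x => x.2.2)) "-1" with
          | some length_first_entity, some begin_last_entity =>
              let entity_1 := PySem.List.slice data_point (some 0) (some (length_first_entity : Int))
              let entity_2 := PySem.List.slice data_point (some ((begin_last_entity : Int) + 1)) none
              let entity_1_text := PySem.Str.lower (PySem.Str.join " " (entity_1.map (fun x => x.1)))
              let entity_2_text := PySem.Str.lower (PySem.Str.join " " (entity_2.map (fun x => x.1)))
              entity_pairs ++ [(entity_1_text, entity_2_text)]
          | _, _ => entity_pairs)
        (acc ++ [(PySem.Str.lower (PySem.Str.join " "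
            ((PySem.List.slice dp (some 0) (some (i : Int))).map (fun x => x.1))),
          PySem.Str.lower (PySem.Str.join " "
            ((PySem.List.slice dp (some ((j : Int) + 1)) none).map (fun x => x.1))))]) := by
      intro l
      rw [List.foldl_cons]
      congr 1
      simp only [hi, hj]
    rw [hstep t, ih hpre', pvPoint_eq dp i j hi hj, List.map_cons, List.append_assoc,
        List.singleton_append]

-- ===== VERDICT (by name: the statement is the Claim_ definition above) =====
theorem extract_entity_pairs_py_spec : Claim_equal_extract_entity_pairs_py := by
  intro data_X _ hpre
  unfold Spec_extract_entity_pairs_py extract_entity_pairs_py extract_entity_pairs_py_alt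
  simpa using pvMain data_X hpre []
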